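-- pv_equiv track=rewrite | github.com/fagan2888/snake | csc work/A3/tweets_raw.py | helper_4
-- ===== SOURCE A (Python) =====
-- def helper_4(candidate_hashtags):
--     '''
--     Pass a dictionary of candidates as keys and their respective hashtags as
--     their associated values. Returns a dictionary of candidates as keys and
--     the candidates' unique hashtags as their respective values.
--     '''
--
--     unique_dict = {}
--     for key, value in candidate_hashtags.items():
--         unique_dict[key] = []
--         candidate = candidate_hashtags[key]
--         for i in range(len(candidate)):
--             hashtag = candidate[i]
--             for k in candidate_hashtags.keys():
--                 if k != key:
--                     if hashtag not in candidate_hashtags[k]: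
--                         unique_dict[key].append(hashtag)
--     return unique_dict
-- ===== SOURCE B (Python) =====
-- def helper_4(candidate_hashtags):
--     '''Counting-table re-implementation: one pass builds, for every hashtag,
--     the number of candidates whose list contains it; each output list is then
--     produced directly as K - count copies per hashtag occurrence.'''
--     K = len(candidate_hashtags)
--     table = {}
--     for tags in candidate_hashtags.values():
--         for h in dict.fromkeys(tags):
--             table[h] = table.get(h, 0) + 1
--     return {key: [h for h in tags for _ in range(K - table[h])]
--             for key, tags in candidate_hashtags.items()}
-- ===== Notes on version B (the rewrite author's own statement) =====
-- stated objective: alternative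
-- what changed: Replaces the triple nested loop (for each candidate, each hashtag, scan every other candidate's list) by a precomputed containment counter per hashtag, so each output entry is emitted as K - count copies with no inner scans; the output itself can be quadratic in size, so wall-clock gain is constant-factor only.
import Mathlib
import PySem

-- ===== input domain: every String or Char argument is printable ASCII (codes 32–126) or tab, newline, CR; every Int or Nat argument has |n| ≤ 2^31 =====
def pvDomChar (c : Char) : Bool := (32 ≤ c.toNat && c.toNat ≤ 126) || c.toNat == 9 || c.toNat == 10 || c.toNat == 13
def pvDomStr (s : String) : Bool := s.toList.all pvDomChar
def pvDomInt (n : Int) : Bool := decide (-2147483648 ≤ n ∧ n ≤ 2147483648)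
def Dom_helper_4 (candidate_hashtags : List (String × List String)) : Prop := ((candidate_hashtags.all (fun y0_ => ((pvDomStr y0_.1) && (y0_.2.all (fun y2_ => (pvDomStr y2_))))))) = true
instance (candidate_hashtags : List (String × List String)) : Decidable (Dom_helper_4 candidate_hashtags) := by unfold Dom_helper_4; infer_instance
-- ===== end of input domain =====

-- B replaces A's triple nested loop by a one-pass containment counter per hashtag (objective: alternative algorithm; not claimed faster).

-- ===== PORT A =====
def helper_4 (candidate_hashtags : List (String × List String)) : List (String × List String) :=
  let d : PySem.Dict String (List String) := PySem.Dict.mk candidate_hashtags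
  (candidate_hashtags.foldl (fun ud kv =>
    let key := kv.1
    let ud := ud.insert key []
    let candidate := d.getD key []
    (PySem.List.pyRange 0 (PySem.List.len candidate) 1).foldl (fun ud i =>
      let hashtag := PySem.List.pyGetD candidate i ""
      candidate_hashtags.foldl (fun ud q =>
        if q.1 ≠ key then
          if ¬ (hashtag ∈ d.getD q.1 []) then ud.modify key [] (· ++ [hashtag]) else ud
        else ud) ud) ud) PySem.Dict.empty).items

-- ===== PORT B =====
def helper_4_alt (candidate_hashtags : List (String × List String)) : List (String × List String) :=
  let K := candidate_hashtags.length
  let table : PySem.Dict String Nat := candidate_hashtags.foldl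
    (fun t p => (PySem.List.dedup p.2).foldl (fun t h => t.modify h 0 (· + 1)) t) PySem.Dict.empty
  candidate_hashtags.map (fun p =>
    (p.1, p.2.flatMap (fun h => List.replicate (K - table.getD h 0) h)))

-- ===== PRECONDITION & SPEC =====
-- Pre_ excludes association lists with duplicate keys: they do not denote a Python dict
-- (the dict the function receives collapses duplicates), so entry-wise behaviour there is accidental.
def Pre_helper_4 (candidate_hashtags : List (String × List String)) : Prop :=
  (candidate_hashtags.map Prod.fst).Nodup
instance (candidate_hashtags : List (String × List String)) : Decidable (Pre_helper_4 candidate_hashtags) := by unfold Pre_helper_4; infer_instance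
def pvWitness_helper_4 : (List (String × List String)) :=
  [("trump", ["maga", "usa"]), ("biden", ["usa", "vote"])]
def Spec_helper_4 (candidate_hashtags : List (String × List String)) (out : List (String × List String)) : Prop := out = helper_4_alt candidate_hashtags
instance (candidate_hashtags : List (String × List String)) (out : List (String × List String)) : Decidable (Spec_helper_4 candidate_hashtags out) := by unfold Spec_helper_4; infer_instance

-- ===== CLAIM (what is proved, stated in full; the proofs are below) =====
def Claim_equal_helper_4 : Prop := ∀ (candidate_hashtags : List (String × List String)), Dom_helper_4 candidate_hashtags → Pre_helper_4 candidate_hashtags → Spec_helper_4 candidate_hashtags (helper_4 candidate_hashtags)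

-- ===== LEMMAS AND PROOFS =====

-- A's inner condition on a dict entry q, for current key `key` and hashtag `h`.
def pvC (dall : List (String × List String)) (key h : String) (q : String × List String) : Bool :=
  if q.1 ≠ key then (if ¬ (h ∈ (PySem.Dict.mk dall).getD q.1 []) then true else false) else false

-- A's per-key output list.
def pvF (dall : List (String × List String)) (key : String) (value : List String) : List String :=
  value.flatMap (fun h => List.replicate (dall.countP (pvC dall key h)) h)

theorem pv_get?_last {pre : List (String × List String)} {key : String} {acc : List String}
    (hk : key ∉ pre.map Prod.fst) :
    (PySem.Dict.mk (pre ++ [(key, acc)])).get? key = some acc := by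
  induction pre with
  | nil => simp [PySem.Dict.get?_mk_cons]
  | cons a l ih =>
    obtain ⟨k, v⟩ := a
    simp only [List.map_cons, List.mem_cons, not_or] at hk
    simp only [List.cons_append, PySem.Dict.get?_mk_cons]
    rw [if_neg (by simp only [beq_iff_eq]; exact fun h => hk.1 h.symm), ih hk.2]

theorem pv_contains_last {pre : List (String × List String)} {key : String} {acc : List String} :
    (PySem.Dict.mk (pre ++ [(key, acc)])).contains key = true := by
  simp only [PySem.Dict.contains, List.any_append, List.any_cons, List.any_nil,
    beq_self_eq_true, Bool.true_or, Bool.or_true]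

theorem pv_modify_last {pre : List (String × List String)} {key : String} {acc : List String}
    (hk : key ∉ pre.map Prod.fst) (g : List String → List String) :
    (PySem.Dict.mk (pre ++ [(key, acc)])).modify key [] g
      = PySem.Dict.mk (pre ++ [(key, g acc)]) := by
  have hget : (PySem.Dict.mk (pre ++ [(key, acc)])).getD key [] = acc := by
    simp [PySem.Dict.getD_eq_get?_getD, pv_get?_last hk]
  apply PySem.Dict.ext
  simp only [PySem.Dict.modify, hget]
  rw [PySem.Dict.items_insert_of_contains _ _ pv_contains_last]
  simp only [List.map_append, List.map_cons, List.map_nil, beq_self_eq_true, if_pos]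
  congr 1
  conv_rhs => rw [← List.map_id pre]
  apply List.map_congr_left
  intro p hp
  have hne : p.1 ≠ key := by
    intro he
    exact hk (he ▸ List.mem_map_of_mem hp)
  simp [hne]

theorem pv_inner_fold (l : List (String × List String)) (C : String × List String → Bool)
    {pre : List (String × List String)} {key : String} (h : String) (acc : List String)
    (hk : key ∉ pre.map Prod.fst) :
    l.foldl (fun ud q => if C q then ud.modify key [] (· ++ [h]) else ud)
        (PySem.Dict.mk (pre ++ [(key, acc)]))
      = PySem.Dict.mk (pre ++ [(key, acc ++ List.replicate (l.countP C) h)]) := by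
  induction l generalizing acc with
  | nil => simp
  | cons q l ih =>
    by_cases hq : C q
    · simp only [List.foldl_cons, hq, if_pos, pv_modify_last hk]
      rw [ih (acc ++ [h])]
      simp [hq, List.replicate_succ]
    · simp only [List.foldl_cons, hq, Bool.false_eq_true, if_neg, not_false_iff]
      rw [ih acc]
      simp [hq]

theorem pv_cand_fold (dall : List (String × List String)) (key : String)
    (candidate : List String) {pre : List (String × List String)} (acc : List String)
    (hk : key ∉ pre.map Prod.fst) :
    candidate.foldl (fun ud h =>
        dall.foldl (fun ud q =>
          if q.1 ≠ key then
            if ¬ (h ∈ (PySem.Dict.mk dall).getD q.1 []) then ud.modify key [] (· ++ [h]) else ud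
          else ud) ud)
        (PySem.Dict.mk (pre ++ [(key, acc)]))
      = PySem.Dict.mk (pre ++ [(key,
          acc ++ candidate.flatMap (fun h => List.replicate (dall.countP (pvC dall key h)) h))]) := by
  induction candidate generalizing acc with
  | nil => simp
  | cons h t ih =>
    simp only [List.foldl_cons]
    have hbody : (fun (ud : PySem.Dict String (List String)) (q : String × List String) =>
        if q.1 ≠ key then
          if ¬ (h ∈ (PySem.Dict.mk dall).getD q.1 []) then ud.modify key [] (· ++ [h]) else ud
        else ud)
        = (fun ud q => if pvC dall key h q then ud.modify key [] (· ++ [h]) else ud) := by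
      funext ud q
      unfold pvC
      by_cases h1 : q.1 ≠ key
      · by_cases h2 : ¬ (h ∈ (PySem.Dict.mk dall).getD q.1 [])
        · simp [h1, h2]
        · simp [h1, h2]
      · simp [h1]
    rw [hbody, pv_inner_fold dall (pvC dall key h) h acc hk, ih (acc ++ List.replicate (dall.countP (pvC dall key h)) h)]
    simp

theorem pv_key_unique {dall : List (String × List String)} (hnd : (dall.map Prod.fst).Nodup)
    {p q : String × List String} (hp : p ∈ dall) (hq : q ∈ dall) (he : q.1 = p.1) : q = p :=
  List.inj_on_of_nodup_map hnd hq hp he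

theorem pv_getD_mk_of_mem {dall : List (String × List String)} (hnd : (dall.map Prod.fst).Nodup)
    {q : String × List String} (hq : q ∈ dall) :
    (PySem.Dict.mk dall).getD q.1 [] = q.2 := by
  apply PySem.Dict.getD_of_mem_items (d := PySem.Dict.mk dall) (k := q.1) (v := q.2)
  · simpa using hq
  · simpa [PySem.Dict.keys_mk] using hnd

theorem pv_range_fold (dall : List (String × List String)) (key : String)
    (candidate : List String) (init : PySem.Dict String (List String)) :
    (PySem.List.pyRange 0 (PySem.List.len candidate) 1).foldl (fun ud i =>
        dall.foldl (fun ud q =>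
          if q.1 ≠ key then
            if ¬ (PySem.List.pyGetD candidate i "" ∈ (PySem.Dict.mk dall).getD q.1 [])
            then ud.modify key [] (· ++ [PySem.List.pyGetD candidate i ""]) else ud
          else ud) ud) init
      = candidate.foldl (fun ud h =>
          dall.foldl (fun ud q =>
            if q.1 ≠ key then
              if ¬ (h ∈ (PySem.Dict.mk dall).getD q.1 []) then ud.modify key [] (· ++ [h]) else ud
            else ud) ud) init :=
  PySem.List.foldl_pyRange_zero_pyGetD candidate ""
    (fun ud h => dall.foldl (fun ud q =>
      if q.1 ≠ key then
        if ¬ (h ∈ (PySem.Dict.mk dall).getD q.1 []) then ud.modify key [] (· ++ [h]) else ud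
      else ud) ud) init

theorem pv_outer (dall : List (String × List String)) (hnd : (dall.map Prod.fst).Nodup) :
    ∀ (l pre : List (String × List String)), dall = pre ++ l →
    l.foldl (fun ud kv =>
        (PySem.List.pyRange 0 (PySem.List.len ((PySem.Dict.mk dall).getD kv.1 [])) 1).foldl (fun ud i =>
          dall.foldl (fun ud q =>
            if q.1 ≠ kv.1 then
              if ¬ (PySem.List.pyGetD ((PySem.Dict.mk dall).getD kv.1 []) i "" ∈ (PySem.Dict.mk dall).getD q.1 [])
              then ud.modify kv.1 [] (· ++ [PySem.List.pyGetD ((PySem.Dict.mk dall).getD kv.1 []) i ""]) else ud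
            else ud) ud) (ud.insert kv.1 []))
      (PySem.Dict.mk (pre.map (fun p => (p.1, pvF dall p.1 p.2))))
      = PySem.Dict.mk (dall.map (fun p => (p.1, pvF dall p.1 p.2))) := by
  intro l
  induction l with
  | nil =>
    intro pre hpre
    rw [List.append_nil] at hpre
    subst hpre
    rfl
  | cons kv t ih =>
    intro pre hpre
    have hkv : kv ∈ dall := by rw [hpre]; simp
    have hkpre : kv.1 ∉ pre.map Prod.fst := by
      rw [hpre, List.map_append, List.map_cons] at hnd
      intro hmem
      exact (List.nodup_append.mp hnd).2.2 kv.1 hmem kv.1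
        (List.mem_cons.mpr (Or.inl rfl)) rfl
    have hkpre' : kv.1 ∉ (pre.map (fun p => (p.1, pvF dall p.1 p.2))).map Prod.fst := by
      simpa [List.map_map, Function.comp] using hkpre
    have hcont : (PySem.Dict.mk (pre.map (fun p => (p.1, pvF dall p.1 p.2)))).contains kv.1 = false := by
      simp only [PySem.Dict.contains, List.any_eq_true, not_exists] at *
      simp only [Bool.eq_false_iff, ne_eq, List.any_eq_true]
      rintro ⟨p, hp, hbeq⟩
      exact hkpre' (by
        have : p.1 = kv.1 := by simpa using hbeq
        exact this ▸ List.mem_map_of_mem hp)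
    have hins : (PySem.Dict.mk (pre.map (fun p => (p.1, pvF dall p.1 p.2)))).insert kv.1 []
        = PySem.Dict.mk (pre.map (fun p => (p.1, pvF dall p.1 p.2)) ++ [(kv.1, [])]) := by
      apply PySem.Dict.ext
      rw [PySem.Dict.items_insert_of_not_contains _ _ hcont]
    have hcand : (PySem.Dict.mk dall).getD kv.1 [] = kv.2 := pv_getD_mk_of_mem hnd hkv
    simp only [List.foldl_cons, hins, hcand]
    rw [pv_range_fold dall kv.1 kv.2 _]
    rw [pv_cand_fold dall kv.1 kv.2 [] hkpre']
    have hstep : pre.map (fun p => (p.1, pvF dall p.1 p.2)) ++ [(kv.1, [] ++ kv.2.flatMap (fun h => List.replicate (dall.countP (pvC dall kv.1 h)) h))]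
        = (pre ++ [kv]).map (fun p => (p.1, pvF dall p.1 p.2)) := by
      simp [pvF]
    rw [hstep, ih (pre ++ [kv]) (by simp [hpre])]

theorem pv_A_eq (dall : List (String × List String)) (hnd : (dall.map Prod.fst).Nodup) :
    helper_4 dall = dall.map (fun p => (p.1, pvF dall p.1 p.2)) := by
  unfold helper_4
  have := pv_outer dall hnd dall [] rfl
  simp only [List.map_nil] at this
  exact congrArg PySem.Dict.items this

theorem pv_dedup_count (xs : List String) (h : String) :
    (PySem.List.dedup xs).count h = if h ∈ xs then 1 else 0 := by
  by_cases hm : h ∈ xs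
  · rw [if_pos hm]
    apply List.count_eq_one_of_mem
    · simpa using PySem.Set.nodup_ofList xs
    · simpa [PySem.Set.mem_ofList] using hm
  · rw [if_neg hm]
    simp [List.count_eq_zero, PySem.Set.mem_ofList, hm]

theorem pv_table (dall : List (String × List String)) (h : String) :
    ∀ t0 : PySem.Dict String Nat,
    (dall.foldl (fun t p => (PySem.List.dedup p.2).foldl (fun t x => t.modify x 0 (· + 1)) t) t0).getD h 0
      = t0.getD h 0 + dall.countP (fun p => decide (h ∈ p.2)) := by
  induction dall with
  | nil => intro t0; simp
  | cons p t ih =>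
    intro t0
    simp only [List.foldl_cons]
    rw [ih]
    rw [PySem.Dict.getD_foldl_modify_add_one_nat]
    rw [pv_dedup_count p.2 h]
    by_cases hm : h ∈ p.2 <;> simp [hm, List.countP_cons] <;> omega

theorem pv_B_eq (dall : List (String × List String)) :
    helper_4_alt dall = dall.map (fun p => (p.1,
      p.2.flatMap (fun h => List.replicate (dall.length - dall.countP (fun q => decide (h ∈ q.2))) h))) := by
  unfold helper_4_alt
  apply List.map_congr_left
  intro p hp
  have htab : ∀ h : String,
      (dall.foldl (fun t p => (PySem.List.dedup p.2).foldl (fun t x => t.modify x 0 (· + 1)) t)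
        PySem.Dict.empty).getD h 0 = dall.countP (fun q => decide (h ∈ q.2)) := by
    intro h
    rw [pv_table dall h PySem.Dict.empty]
    simp
  simp only [htab]

theorem pv_count_eq (dall : List (String × List String)) (hnd : (dall.map Prod.fst).Nodup)
    {p : String × List String} (hp : p ∈ dall) {h : String} (hh : h ∈ p.2) :
    dall.countP (pvC dall p.1 h) = dall.length - dall.countP (fun q => decide (h ∈ q.2)) := by
  have h1 : dall.countP (pvC dall p.1 h) = dall.countP (fun q => decide (¬ (h ∈ q.2))) := by
    apply List.countP_congr
    intro q hq
    have hget : (PySem.Dict.mk dall).getD q.1 [] = q.2 := pv_getD_mk_of_mem hnd hq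
    unfold pvC
    by_cases heq : q.1 = p.1
    · have : q = p := pv_key_unique hnd hp hq heq
      subst this
      simp [heq, hh]
    · simp [heq, hget]
  rw [h1]
  have h2 := List.length_eq_countP_add_countP (fun q : String × List String => decide (h ∈ q.2)) (l := dall)
  have h3 : dall.countP (fun q : String × List String => decide (¬ (h ∈ q.2)))
      = dall.countP (fun a => decide (¬ (decide (h ∈ a.2)) = true)) := by
    apply List.countP_congr; intro x hx; simp
  omega

theorem pv_flatMap_congr {α β : Type} (l : List α) {f g : α → List β}
    (h : ∀ x ∈ l, f x = g x) : l.flatMap f = l.flatMap g := by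
  induction l with
  | nil => rfl
  | cons x t ih =>
    simp only [List.flatMap_cons, h x (by simp)]
    rw [ih (fun y hy => h y (by simp [hy]))]

-- ===== VERDICT (by name: the statement is the Claim_ definition above) =====
theorem helper_4_spec : Claim_equal_helper_4 := by
  intro dall _ hpre
  unfold Spec_helper_4
  rw [pv_A_eq dall hpre, pv_B_eq dall]
  apply List.map_congr_left
  intro p hp
  unfold pvF
  refine congrArg (fun l => (p.1, l)) ?_
  apply pv_flatMap_congr
  intro h hh
  rw [pv_count_eq dall hpre hp hh]
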